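-- pv_equiv track=rewrite | github.com/BoudewijnKlijn/competitive_programming | leetcode/leetcode_1937.py | maximum_points_row_sweep_twice
-- ===== SOURCE A (Python) =====
-- from typing import List
--
-- def maximum_points_row_sweep_twice(col_points: List[int]) -> List[int]:
--     """Helper function
--     (Faster than the heap version. Sweep twice: once left to right and once right to left.)
--     In some row, each column gives a certain number of points.
--     This function returns the maximum number of points per column.
--     Columns with few points, but close to a column with many points still give many points.
--     Each column away subtracts 1.
--     Examples:
--         [4, 0, 4] -> [4, 3, 4]
--         [1, 5, 1] -> [4, 5, 4]
--         [4, 0, 0] -> [4, 3, 2]"""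
--     best = [0] * len(col_points)
--     best[0] = col_points[0]
--     # move left to right
--     for i in range(1, len(col_points)):
--         best[i] = max(best[i - 1] - 1, col_points[i])
--     # move right to left
--     for i in range(len(col_points) - 2, -1, -1):
--         best[i] = max(best[i + 1] - 1, best[i])
--     return best
-- ===== SOURCE B (Python) =====
-- from typing import List
--
-- def maximum_points_row_sweep_twice(col_points: List[int]) -> List[int]:
--     """Brute force by the definition: each column's value is the best over all
--     columns of (points there minus the distance)."""
--     n = len(col_points)
--     return [max(col_points[j] - abs(i - j) for j in range(n)) for i in range(n)]
-- ===== Notes on version B (the rewrite author's own statement) =====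
-- stated objective: simpler
-- what changed: Replaces A's two in-place DP sweeps with a decaying running max by a direct brute-force double scan computing each column's value straight from the definition (max over all j of col_points[j] - |i - j|).
import Mathlib
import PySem

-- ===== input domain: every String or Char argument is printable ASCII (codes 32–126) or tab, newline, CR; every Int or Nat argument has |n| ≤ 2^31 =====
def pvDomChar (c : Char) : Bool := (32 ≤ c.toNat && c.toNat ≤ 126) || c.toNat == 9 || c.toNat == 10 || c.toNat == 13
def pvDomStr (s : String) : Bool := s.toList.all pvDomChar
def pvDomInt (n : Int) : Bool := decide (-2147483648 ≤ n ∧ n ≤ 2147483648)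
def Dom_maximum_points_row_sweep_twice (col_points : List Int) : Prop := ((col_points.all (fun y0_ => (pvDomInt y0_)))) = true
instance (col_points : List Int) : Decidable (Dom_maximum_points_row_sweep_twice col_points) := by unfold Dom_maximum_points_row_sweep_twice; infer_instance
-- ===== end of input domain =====

-- B replaces A's two in-place DP sweeps by a brute-force double scan straight from the
-- definition (max over all j of col_points[j] - |i - j|): simpler, not faster.

-- ===== PORT A =====
def maximum_points_row_sweep_twice (col_points : List Int) : List Int :=
  -- best = [0] * len(col_points); best[0] = col_points[0]  (raises IndexError on [] — excluded by Pre_)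
  let best0 := PySem.List.pySetD (List.replicate col_points.length (0 : Int)) 0
      (PySem.List.pyGetD col_points 0 0)
  -- for i in range(1, len(col_points)): best[i] = max(best[i-1] - 1, col_points[i])
  let best1 := (PySem.List.pyRange 1 (PySem.List.len col_points) 1).foldl
      (fun b i => PySem.List.pySetD b i
        (max (PySem.List.pyGetD b (i - 1) 0 - 1) (PySem.List.pyGetD col_points i 0))) best0
  -- for i in range(len(col_points) - 2, -1, -1): best[i] = max(best[i+1] - 1, best[i])
  let best2 := (PySem.List.pyRange (PySem.List.len col_points - 2) (-1) (-1)).foldl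
      (fun b i => PySem.List.pySetD b i
        (max (PySem.List.pyGetD b (i + 1) 0 - 1) (PySem.List.pyGetD b i 0))) best1
  best2

-- ===== PORT B =====
def maximum_points_row_sweep_twice_alt (col_points : List Int) : List Int :=
  let n := PySem.List.len col_points
  (PySem.List.pyRange 0 n 1).map (fun i =>
    match PySem.List.max?
        ((PySem.List.pyRange 0 n 1).map (fun j => PySem.List.pyGetD col_points j 0 - |i - j|))
        (fun x => x) with
    | some v => v
    | none => 0)  -- unreachable: the inner range is nonempty whenever the outer one is

-- ===== PRECONDITION & SPEC =====
-- Pre_ excludes only the empty list, on which A raises IndexError (best[0] = col_points[0]).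
def Pre_maximum_points_row_sweep_twice (col_points : List Int) : Prop := col_points ≠ []
instance (col_points : List Int) : Decidable (Pre_maximum_points_row_sweep_twice col_points) := by
  unfold Pre_maximum_points_row_sweep_twice; infer_instance
def pvWitness_maximum_points_row_sweep_twice : List Int := [4, 0, 4]

def Spec_maximum_points_row_sweep_twice (col_points : List Int) (out : List Int) : Prop :=
  out = maximum_points_row_sweep_twice_alt col_points
instance (col_points : List Int) (out : List Int) : Decidable (Spec_maximum_points_row_sweep_twice col_points out) := by
  unfold Spec_maximum_points_row_sweep_twice; infer_instance

-- ===== CLAIM (what is proved, stated in full; the proofs are below) =====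
def Claim_equal_maximum_points_row_sweep_twice : Prop := ∀ (col_points : List Int), Dom_maximum_points_row_sweep_twice col_points → Pre_maximum_points_row_sweep_twice col_points → Spec_maximum_points_row_sweep_twice col_points (maximum_points_row_sweep_twice col_points)

-- ===== LEMMAS AND PROOFS =====

-- the value of A's left-to-right sweep at index i
def sweepL (c : List Int) : ℕ → Int
  | 0 => c.getD 0 0
  | i + 1 => max (sweepL c i - 1) (c.getD (i + 1) 0)

-- the value of A's right-to-left sweep at index i
def sweepR (c : List Int) (i : ℕ) : Int :=
  if _h : i + 1 < c.length then max (sweepR c (i + 1) - 1) (sweepL c i) else sweepL c i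
termination_by c.length - i

-- max of f 0, …, f k
def vmax (f : ℕ → Int) : ℕ → Int
  | 0 => f 0
  | k + 1 => max (vmax f k) (f (k + 1))

theorem le_vmax (f : ℕ → Int) (k j : ℕ) (h : j ≤ k) : f j ≤ vmax f k := by
  induction k with
  | zero => simp_all [vmax]
  | succ k ih =>
    by_cases h' : j = k + 1
    · subst h'; exact le_max_right _ _
    · exact le_trans (ih (by omega)) (le_max_left _ _)

theorem vmax_attained (f : ℕ → Int) (k : ℕ) : ∃ j ≤ k, vmax f k = f j := by
  induction k with
  | zero => exact ⟨0, le_refl _, rfl⟩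
  | succ k ih =>
    obtain ⟨j, hj, he⟩ := ih
    rcases le_total (f (k + 1)) (vmax f k) with h | h
    · exact ⟨j, Nat.le_succ_of_le hj, by rw [vmax, max_eq_left h, he]⟩
    · exact ⟨k + 1, le_refl _, by rw [vmax, max_eq_right h]⟩

theorem vmax_congr (f g : ℕ → Int) (k : ℕ) (h : ∀ j ≤ k, f j = g j) : vmax f k = vmax g k := by
  induction k with
  | zero => simp [vmax, h 0 (le_refl _)]
  | succ k ih =>
    simp only [vmax]
    rw [ih (fun j hj => h j (Nat.le_succ_of_le hj)), h (k + 1) (le_refl _)]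

theorem vmax_sub_const (f : ℕ → Int) (d : Int) (k : ℕ) :
    vmax (fun j => f j - d) k = vmax f k - d := by
  induction k with
  | zero => rfl
  | succ k ih => simp only [vmax, ih, max_sub_sub_right]

theorem sweepL_eq_vmax (c : List Int) (i : ℕ) :
    sweepL c i = vmax (fun j => c.getD j 0 - ((i : Int) - j)) i := by
  induction i with
  | zero => simp [sweepL, vmax]
  | succ i ih =>
    simp only [sweepL, vmax, ih]
    have h1 : vmax (fun j => c.getD j 0 - ((((i + 1 : ℕ)) : Int) - j)) i
        = vmax (fun j => c.getD j 0 - ((i : Int) - j)) i - 1 := by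
      rw [← vmax_sub_const]
      exact vmax_congr _ _ i (fun j _ => by push_cast; ring)
    rw [h1]
    congr 1
    push_cast; ring

-- brute-force value of column i
def bru (c : List Int) (i : ℕ) : Int :=
  vmax (fun j => c.getD j 0 - |(i : Int) - j|) (c.length - 1)

theorem abs_dist_step (x y : Int) : |x - y| ≤ |x + 1 - y| + 1 := by
  rcases abs_cases (x - y) with ⟨h1, h2⟩ | ⟨h1, h2⟩ <;>
    rcases abs_cases (x + 1 - y) with ⟨h3, h4⟩ | ⟨h3, h4⟩ <;> omega

theorem sweepR_eq_bru (c : List Int) : ∀ (d i : ℕ), i < c.length → c.length - 1 - i = d →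
    sweepR c i = bru c i := by
  intro d
  induction d with
  | zero =>
    intro i hi hd
    have hi' : i = c.length - 1 := by omega
    rw [sweepR, dif_neg (by omega)]
    unfold bru
    rw [sweepL_eq_vmax, ← hi']
    apply vmax_congr
    intro j hj
    rw [abs_of_nonneg (by omega)]
  | succ d ih =>
    intro i hi hd
    have hsucc : i + 1 < c.length := by omega
    rw [sweepR, dif_pos hsucc, ih (i + 1) hsucc (by omega), sweepL_eq_vmax]
    unfold bru
    apply le_antisymm
    · apply max_le
      · obtain ⟨j, hj, he⟩ := vmax_attained (fun j => c.getD j 0 - |((i + 1 : ℕ) : Int) - (j : ℕ)|) (c.length - 1)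
        rw [he]
        refine le_trans ?_ (le_vmax _ _ j hj)
        have := abs_dist_step (i : Int) (j : ℕ)
        have hcast : ((i + 1 : ℕ) : Int) = (i : Int) + 1 := by push_cast; ring
        rw [hcast]
        omega
      · obtain ⟨j, hj, he⟩ := vmax_attained (fun j => c.getD j 0 - ((i : Int) - (j : ℕ))) i
        rw [he]
        refine le_trans ?_ (le_vmax _ _ j (by omega))
        rw [abs_of_nonneg (by omega)]
    · obtain ⟨j, hj, he⟩ := vmax_attained (fun j => c.getD j 0 - |(i : Int) - (j : ℕ)|) (c.length - 1)
      rw [he]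
      by_cases hji : j ≤ i
      · refine le_trans (le_trans ?_ (le_vmax _ i j hji)) (le_max_right _ _)
        rw [abs_of_nonneg (by omega)]
      · refine le_trans ?_ (le_max_left _ _)
        have hb : c.getD j 0 - |((i + 1 : ℕ) : Int) - (j : ℕ)| ≤
            vmax (fun j => c.getD j 0 - |((i + 1 : ℕ) : Int) - (j : ℕ)|) (c.length - 1) :=
          le_vmax _ _ j hj
        have habs : |(i : Int) - (j : ℕ)| = |((i + 1 : ℕ) : Int) - (j : ℕ)| + 1 := by
          rw [abs_of_nonpos (by omega), abs_of_nonpos (by omega)]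
          push_cast; ring
        omega

-- (b.set k v).getD, in if form
theorem getD_set_eq (b : List Int) (k i : ℕ) (v : Int) (hk : k < b.length) :
    (b.set k v).getD i 0 = if i = k then v else b.getD i 0 := by
  simp only [List.getD_eq_getElem?_getD, List.getElem?_set, hk]
  by_cases h : i = k
  · simp [h]
  · simp [h, Ne.symm h]

-- invariant of A's left-to-right fold
theorem foldA_left (c : List Int) : ∀ (m k : ℕ) (b : List Int), k + m = c.length → 1 ≤ k →
    b.length = c.length → (∀ i < k, b.getD i 0 = sweepL c i) →
    (((PySem.List.pyRange (k : Int) (c.length : Int) 1).foldl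
      (fun b i => PySem.List.pySetD b i
        (max (PySem.List.pyGetD b (i - 1) 0 - 1) (PySem.List.pyGetD c i 0))) b).length = c.length ∧
     ∀ i < c.length, ((PySem.List.pyRange (k : Int) (c.length : Int) 1).foldl
      (fun b i => PySem.List.pySetD b i
        (max (PySem.List.pyGetD b (i - 1) 0 - 1) (PySem.List.pyGetD c i 0))) b).getD i 0 = sweepL c i) := by
  intro m
  induction m with
  | zero =>
    intro k b hk h1 hlen hinv
    rw [PySem.List.pyRange_one_eq_nil (by omega)]
    exact ⟨hlen, fun i hi => hinv i (by omega)⟩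
  | succ m ih =>
    intro k b hk h1 hlen hinv
    rw [PySem.List.pyRange_one_cons (by omega), List.foldl_cons]
    have e1 : (k : Int) - 1 = ((k - 1 : ℕ) : Int) := by omega
    have e2 : (k : Int) + 1 = ((k + 1 : ℕ) : Int) := by omega
    rw [e1, PySem.List.pySetD_natCast, PySem.List.pyGetD_natCast, PySem.List.pyGetD_natCast, e2]
    have hv : max (b.getD (k - 1) 0 - 1) (c.getD k 0) = sweepL c k := by
      rw [hinv (k - 1) (by omega)]
      have hk' : k - 1 + 1 = k := by omega
      conv_rhs => rw [← hk']
      rw [sweepL, hk']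
    rw [hv]
    refine ih (k + 1) (b.set k (sweepL c k)) (by omega) (by omega) (by simpa using hlen) ?_
    intro i hi
    rw [getD_set_eq b k i _ (by omega)]
    by_cases h : i = k
    · simp [h]
    · rw [if_neg h]; exact hinv i (by omega)

-- invariant of A's right-to-left fold
theorem foldA_right (c : List Int) : ∀ (m : ℕ) (b : List Int), m < c.length →
    b.length = c.length →
    (∀ i, m ≤ i → i < c.length → b.getD i 0 = sweepR c i) →
    (∀ i < m, b.getD i 0 = sweepL c i) →
    (((PySem.List.pyRange ((m : Int) - 1) (-1) (-1)).foldl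
      (fun b i => PySem.List.pySetD b i
        (max (PySem.List.pyGetD b (i + 1) 0 - 1) (PySem.List.pyGetD b i 0))) b).length = c.length ∧
     ∀ i < c.length, ((PySem.List.pyRange ((m : Int) - 1) (-1) (-1)).foldl
      (fun b i => PySem.List.pySetD b i
        (max (PySem.List.pyGetD b (i + 1) 0 - 1) (PySem.List.pyGetD b i 0))) b).getD i 0 = sweepR c i) := by
  intro m
  induction m with
  | zero =>
    intro b hm hlen hR hL
    rw [PySem.List.pyRange_neg_one_eq_nil (by omega)]
    exact ⟨hlen, fun i hi => hR i (by omega) hi⟩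
  | succ m ih =>
    intro b hm hlen hR hL
    have e0 : ((m + 1 : ℕ) : Int) - 1 = (m : Int) := by push_cast; ring
    rw [e0, PySem.List.pyRange_neg_one_cons (by omega), List.foldl_cons]
    have e1 : (m : Int) + 1 = ((m + 1 : ℕ) : Int) := by push_cast; ring
    rw [e1, PySem.List.pySetD_natCast, PySem.List.pyGetD_natCast, PySem.List.pyGetD_natCast]
    have hv : max (b.getD (m + 1) 0 - 1) (b.getD m 0) = sweepR c m := by
      conv_rhs => rw [sweepR]
      rw [dif_pos (by omega), hR (m + 1) (le_refl _) (by omega), hL m (by omega)]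
    rw [hv]
    have := ih (b.set m (sweepR c m)) (by omega) (by simpa using hlen) ?_ ?_
    · exact this
    · intro i hi hi'
      rw [getD_set_eq b m i _ (by omega)]
      by_cases h : i = m
      · simp [h]
      · rw [if_neg h]; exact hR i (by omega) hi'
    · intro i hi
      rw [getD_set_eq b m i _ (by omega), if_neg (by omega)]
      exact hL i (by omega)

-- characterization of port A
theorem portA_char (c : List Int) (hne : c ≠ []) :
    (maximum_points_row_sweep_twice c).length = c.length ∧
    ∀ i < c.length, (maximum_points_row_sweep_twice c).getD i 0 = sweepR c i := by
  have hn : 1 ≤ c.length := List.length_pos_of_ne_nil hne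
  unfold maximum_points_row_sweep_twice
  simp only [PySem.List.len_eq]
  -- best0
  have hb0 : PySem.List.pySetD (List.replicate c.length (0 : Int)) 0 (PySem.List.pyGetD c 0 0)
      = (List.replicate c.length (0 : Int)).set 0 (c.getD 0 0) := by
    rw [PySem.List.pySetD_of_nonneg _ _ (by omega), PySem.List.pyGetD_zero]
    rfl
  rw [hb0]
  have hleft := foldA_left c (c.length - 1) 1 ((List.replicate c.length (0 : Int)).set 0 (c.getD 0 0))
    (by omega) (le_refl _) (by simp) ?_
  simp only [Nat.cast_one] at hleft
  · obtain ⟨hlen1, hinv1⟩ := hleft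
    have e2 : (c.length : Int) - 2 = (((c.length - 1 : ℕ) : Int)) - 1 := by omega
    rw [e2]
    exact foldA_right c (c.length - 1) _ (by omega) hlen1
      (fun i hi hi' => by
        have : i = c.length - 1 := by omega
        subst this
        rw [hinv1 _ hi']
        conv_rhs => rw [sweepR]
        rw [dif_neg (by omega)])
      (fun i hi => hinv1 i (by omega))
  · intro i hi
    have : i = 0 := by omega
    subst this
    rw [getD_set_eq _ 0 0 _ (by simpa using hn), if_pos rfl, sweepL]

-- max of a nonempty mapped range, as vmax
theorem max?_append_singleton (l : List Int) (x v : Int)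
    (h : PySem.List.max? l (fun y => y) = some v) :
    PySem.List.max? (l ++ [x]) (fun y => y) = some (max v x) := by
  cases l with
  | nil => rw [(PySem.List.max?_eq_none_iff ([] : List Int) (fun y => y)).mpr rfl] at h; cases h
  | cons y t =>
    rw [PySem.List.max?_id_cons] at h
    rw [List.cons_append, PySem.List.max?_id_cons, List.foldl_append]
    simp only [List.foldl_cons, List.foldl_nil]
    rw [Option.some_inj.mp h]

theorem max?_range_map (G : ℕ → Int) : ∀ (k : ℕ),
    PySem.List.max? ((List.range (k + 1)).map (fun j => G j)) (fun y => y) = some (vmax G k) := by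
  intro k
  induction k with
  | zero => rw [List.range_one, List.map_cons, List.map_nil, PySem.List.max?_id_cons]; rfl
  | succ k ih =>
    rw [List.range_succ, List.map_append, List.map_cons, List.map_nil]
    exact max?_append_singleton _ _ _ ih

-- characterization of port B
theorem portB_char (c : List Int) (hne : c ≠ []) :
    (maximum_points_row_sweep_twice_alt c).length = c.length ∧
    ∀ i < c.length, (maximum_points_row_sweep_twice_alt c).getD i 0 = bru c i := by
  have hn : 1 ≤ c.length := List.length_pos_of_ne_nil hne
  unfold maximum_points_row_sweep_twice_alt
  simp only [PySem.List.len_eq, PySem.List.pyRange_zero_nat, List.map_map]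
  constructor
  · simp
  · intro i hi
    rw [List.getD_eq_getElem _ _ (by simpa using hi)]
    simp only [List.getElem_map, List.getElem_range, Function.comp_apply]
    have hlen : c.length = (c.length - 1) + 1 := by omega
    have hmx := max?_range_map (fun j : ℕ => c.getD j 0 - |(i : Int) - (j : ℕ)|) (c.length - 1)
    rw [← hlen] at hmx
    have hfun : ((fun j : Int => PySem.List.pyGetD c j 0 - |(i : Int) - j|) ∘ fun k : ℕ => (k : Int))
        = fun j : ℕ => c.getD j 0 - |(i : Int) - (j : ℕ)| := by
      funext j
      simp [PySem.List.pyGetD_natCast]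
    rw [hfun, hmx]
    rfl

-- ===== VERDICT (by name: the statement is the Claim_ definition above) =====
theorem maximum_points_row_sweep_twice_spec : Claim_equal_maximum_points_row_sweep_twice := by
  intro c _ hpre
  unfold Spec_maximum_points_row_sweep_twice
  obtain ⟨hlA, hA⟩ := portA_char c hpre
  obtain ⟨hlB, hB⟩ := portB_char c hpre
  apply List.ext_getElem (by omega)
  intro i hi hi'
  have hic : i < c.length := by omega
  rw [← List.getD_eq_getElem _ 0 hi, ← List.getD_eq_getElem _ 0 hi', hA i hic, hB i hic,
    sweepR_eq_bru c (c.length - 1 - i) i hic rfl]
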